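-- pv_equiv track=rewrite | github.com/charantejk/dbt-project | backend/services/sql_dependency_service.py | _filter_duplicate_tables
-- ===== SOURCE A (Python) =====
-- from typing import List, Dict, Any, Optional, Tuple, Set
--
-- def _filter_duplicate_tables(tables: List[Dict[str, str]]) -> List[Dict[str, str]]:
--     """
--     Filter out duplicate tables without schema
--     If we have tables with the same name but different schemas, prioritize the one with schema
--     """
--     table_map = {}
--
--     for table in tables:
--         table_name = table['table_name']
--         existing_table = table_map.get(table_name)
--
--         # If we don't have this table yet, or the new one has schema but existing doesn't
--         if not existing_table or (table.get('schema') and not existing_table.get('schema')):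
--             table_map[table_name] = table
--
--     return list(table_map.values())
-- ===== SOURCE B (Python) =====
-- def _filter_duplicate_tables(tables):
--     """Two-phase: group tables by name (first-appearance order), then pick per
--     group the first table with a truthy schema, else the group's first table."""
--     groups = {}
--     for table in tables:
--         groups.setdefault(table['table_name'], []).append(table)
--     return [next((t for t in group if t.get('schema')), group[0])
--             for group in groups.values()]
-- ===== Notes on version B (the rewrite author's own statement) =====
-- stated objective: alternative
-- what changed: Replaces A's single pass that maintains a running best-table-per-name dict (conditional overwrite) with a two-phase computation: first group all tables by name into an insertion-ordered dict of lists, then select from each group the first table with a truthy schema (or the group's first table).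
import Mathlib
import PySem

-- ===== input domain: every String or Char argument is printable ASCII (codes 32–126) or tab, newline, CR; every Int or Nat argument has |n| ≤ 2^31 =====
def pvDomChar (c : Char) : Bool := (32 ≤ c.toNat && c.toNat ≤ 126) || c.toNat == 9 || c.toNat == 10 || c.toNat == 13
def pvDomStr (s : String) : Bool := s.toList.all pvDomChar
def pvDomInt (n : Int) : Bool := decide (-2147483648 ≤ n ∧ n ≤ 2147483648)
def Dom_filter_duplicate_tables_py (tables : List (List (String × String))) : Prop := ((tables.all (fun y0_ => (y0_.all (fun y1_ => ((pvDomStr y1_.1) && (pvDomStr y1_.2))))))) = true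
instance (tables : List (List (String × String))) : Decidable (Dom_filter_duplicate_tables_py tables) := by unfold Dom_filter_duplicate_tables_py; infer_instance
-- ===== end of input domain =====

-- B replaces A's running conditional-overwrite dict with a group-by-name-then-select
-- two-phase computation (alternative decomposition, same asymptotic cost).

-- shared helper: table.get(k) / table[k] on a table given as an association list (first match)
def pvGet? (t : List (String × String)) (k : String) : Option String :=
  (t.find? (fun p => p.1 == k)).map (·.2)

-- truthiness of table.get('schema') (None and '' are falsy)
def pvHasSchema (t : List (String × String)) : Bool :=
  !((pvGet? t "schema").getD "" == "")

-- ===== PORT A =====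
def filter_duplicate_tables_py (tables : List (List (String × String))) : List (List (String × String)) :=
  (tables.foldl (fun (m : PySem.Dict String (List (String × String))) table =>
    match pvGet? table "table_name" with
    | none => m  -- KeyError in Python; excluded by Pre_
    | some name =>
      let existing := (m.get? name).getD []   -- [] plays None's falsy role
      if existing.isEmpty || (pvHasSchema table && !pvHasSchema existing)
      then m.insert name table else m)
    PySem.Dict.empty).values

-- ===== PORT B =====
-- next((t for t in group if t.get('schema')), group[0])
def pvChoose (g : List (List (String × String))) : List (String × String) :=
  (g.find? pvHasSchema).getD (g.headD [])

def filter_duplicate_tables_py_alt (tables : List (List (String × String))) : List (List (String × String)) :=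
  let groups := tables.foldl (fun (d : PySem.Dict String (List (List (String × String)))) table =>
    match pvGet? table "table_name" with
    | none => d  -- KeyError in Python; excluded by Pre_
    | some name => d.modify name [] (· ++ [table]))
    PySem.Dict.empty
  groups.values.map pvChoose

-- ===== PRECONDITION & SPEC =====
-- Pre_ excludes exactly the inputs where Python's table['table_name'] raises KeyError.
def Pre_filter_duplicate_tables_py (tables : List (List (String × String))) : Prop :=
  ∀ t ∈ tables, "table_name" ∈ t.map Prod.fst
instance (tables : List (List (String × String))) : Decidable (Pre_filter_duplicate_tables_py tables) := by unfold Pre_filter_duplicate_tables_py; infer_instance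

def pvWitness_filter_duplicate_tables_py : (List (List (String × String))) :=
  [[("table_name", "users"), ("schema", "")], [("table_name", "users"), ("schema", "public")]]

def Spec_filter_duplicate_tables_py (tables : List (List (String × String))) (out : List (List (String × String))) : Prop := out = filter_duplicate_tables_py_alt tables
instance (tables : List (List (String × String))) (out : List (List (String × String))) : Decidable (Spec_filter_duplicate_tables_py tables out) := by unfold Spec_filter_duplicate_tables_py; infer_instance

-- ===== CLAIM (what is proved, stated in full; the proofs are below) =====
def Claim_equal_filter_duplicate_tables_py : Prop := ∀ (tables : List (List (String × String))), Dom_filter_duplicate_tables_py tables → Pre_filter_duplicate_tables_py tables → Spec_filter_duplicate_tables_py tables (filter_duplicate_tables_py tables)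

-- ===== LEMMAS AND PROOFS =====

-- the pair-wise view of B's grouping dict as A's best-so-far dict
def pvF (p : String × List (List (String × String))) : String × List (String × String) :=
  (p.1, pvChoose p.2)

-- invariant relating A's accumulator m to B's accumulator d
def pvRel (m : PySem.Dict String (List (String × String)))
    (d : PySem.Dict String (List (List (String × String)))) : Prop :=
  m.items = d.items.map pvF ∧ d.keys.Nodup ∧
    ∀ p ∈ d.items, p.2 ≠ [] ∧ pvChoose p.2 ≠ []

theorem pvChoose_singleton (t : List (String × String)) : pvChoose [t] = t := by
  simp [pvChoose, List.find?]
  split <;> rfl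

theorem pvChoose_append (g : List (List (String × String))) (t : List (String × String)) (hg : g ≠ []) :
    pvChoose (g ++ [t]) =
      if pvHasSchema t && !pvHasSchema (pvChoose g) then t else pvChoose g := by
  unfold pvChoose
  rw [List.find?_append]
  cases hf : g.find? pvHasSchema with
  | some e =>
    have he := List.find?_some hf
    simp [he]
  | none =>
    have hhead : pvHasSchema (g.headD []) = false := by
      have hmem : g.headD [] ∈ g := by
        cases g with
        | nil => exact absurd rfl hg
        | cons a l => simp
      simpa using List.find?_eq_none.mp hf _ hmem
    simp only [Option.none_or, Option.getD_none, hhead, Bool.not_false, Bool.and_true]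
    cases ht : pvHasSchema t with
    | true => simp [List.find?, ht]
    | false =>
      simp [List.find?, ht]
      cases g with
      | nil => exact absurd rfl hg
      | cons a l => simp

-- A's lookup is B's lookup viewed through pvChoose
theorem pvGetRel (m : PySem.Dict String (List (String × String)))
    (d : PySem.Dict String (List (List (String × String))))
    (h : m.items = d.items.map pvF) (k : String) :
    m.get? k = (d.get? k).map pvChoose := by
  show ((m.items.find? (fun p => p.1 == k)).map (·.2)) =
    ((d.items.find? (fun p => p.1 == k)).map (·.2)).map pvChoose
  rw [h]
  induction d.items with
  | nil => rfl
  | cons p l ih =>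
    simp only [List.map_cons]
    by_cases hk : p.1 = k
    · rw [List.find?_cons_of_pos (by simp [pvF, hk]), List.find?_cons_of_pos (by simp [hk])]
      simp [pvF]
    · rw [List.find?_cons_of_neg (by simp [pvF, hk]), List.find?_cons_of_neg (by simp [hk])]
      exact ih

-- one step of both loops preserves the invariant (for a table inside Pre_)
theorem pvStep (m : PySem.Dict String (List (String × String)))
    (d : PySem.Dict String (List (List (String × String))))
    (t : List (String × String)) (ht : "table_name" ∈ t.map Prod.fst)
    (h : pvRel m d) :
    pvRel
      (match pvGet? t "table_name" with
       | none => m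
       | some name =>
         let existing := (m.get? name).getD []
         if existing.isEmpty || (pvHasSchema t && !pvHasSchema existing)
         then m.insert name t else m)
      (match pvGet? t "table_name" with
       | none => d
       | some name => d.modify name [] (· ++ [t])) := by
  obtain ⟨hitems, hnd, hvals⟩ := h
  have htne : t ≠ [] := by
    intro he; rw [he] at ht; simp at ht
  obtain ⟨name, hname⟩ : ∃ name, pvGet? t "table_name" = some name := by
    have : (t.find? (fun p => p.1 == "table_name")).isSome := by
      rw [List.find?_isSome]
      obtain ⟨p, hp, hp1⟩ := List.mem_map.mp ht
      exact ⟨p, hp, by simp [hp1]⟩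
    cases hf : t.find? (fun p => p.1 == "table_name") with
    | none => rw [hf] at this; simp at this
    | some p => exact ⟨p.2, by simp [pvGet?, hf]⟩
  rw [hname]
  simp only [PySem.Dict.modify]
  cases hd : d.get? name with
  | none =>
    have hm : m.get? name = none := by rw [pvGetRel m d hitems, hd]; rfl
    have hdc : d.contains name = false := by
      rw [PySem.Dict.contains_eq_isSome_get?, hd]; rfl
    have hmc : m.contains name = false := by
      rw [PySem.Dict.contains_eq_isSome_get?, hm]; rfl
    have hdg : d.getD name [] = [] := PySem.Dict.getD_of_get?_eq_none _ _ hd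
    rw [hm]
    simp only [Option.getD_none, List.isEmpty_nil, Bool.true_or, if_true]
    refine ⟨?_, ?_, ?_⟩
    · rw [PySem.Dict.items_insert_of_not_contains _ _ hmc,
        PySem.Dict.items_insert_of_not_contains _ _ hdc, hdg]
      simp [hitems, pvF, pvChoose_singleton]
    · rw [PySem.Dict.keys_insert_of_not_contains _ _ hdc]
      rw [List.nodup_append]
      refine ⟨hnd, List.nodup_singleton _, ?_⟩
      intro a ha b hb
      rw [List.mem_singleton] at hb
      intro hab
      rw [hab, hb, ← PySem.Dict.contains_iff_mem_keys, hdc] at ha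
      simp at ha
    · intro p hp
      rw [PySem.Dict.items_insert_of_not_contains _ _ hdc, hdg] at hp
      rcases List.mem_append.mp hp with hp | hp
      · exact hvals p hp
      · simp at hp
        rw [hp]
        exact ⟨by simp, by rw [pvChoose_singleton]; exact htne⟩
  | some g =>
    have hgmem : (name, g) ∈ d.items := PySem.Dict.mem_items_of_get?_eq_some _ hd
    obtain ⟨hgne, hcne⟩ := hvals (name, g) hgmem
    have hm : m.get? name = some (pvChoose g) := by rw [pvGetRel m d hitems, hd]; rfl
    have hdc : d.contains name = true := by
      rw [PySem.Dict.contains_eq_isSome_get?, hd]; rfl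
    have hmc : m.contains name = true := by
      rw [PySem.Dict.contains_eq_isSome_get?, hm]; rfl
    have hdg : d.getD name [] = g := PySem.Dict.getD_of_get?_eq_some _ _ hd
    have hemp : (pvChoose g).isEmpty = false := by
      cases hc : pvChoose g with
      | nil => exact absurd hc hcne
      | cons a l => rfl
    rw [hm, hdg]
    simp only [Option.getD_some, hemp, Bool.false_or]
    have hkey : ∀ p ∈ d.items, p.1 = name → p.2 = g := by
      intro p hp hp1
      have h2 : d.get? p.1 = some p.2 := by
        cases p; exact PySem.Dict.get?_of_mem_items _ hp hnd
      rw [hp1, hd] at h2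
      exact Option.some.inj h2.symm
    have hnd' : ((d.insert name (g ++ [t])).keys).Nodup := by
      rw [PySem.Dict.keys_insert_of_contains _ _ hdc]; exact hnd
    have hch := pvChoose_append g t hgne
    have hitems' : (d.insert name (g ++ [t])).items =
        d.items.map (fun p => if p.1 == name then (name, g ++ [t]) else p) :=
      PySem.Dict.items_insert_of_contains _ _ hdc
    have hmemnew : ∀ p ∈ (d.insert name (g ++ [t])).items, p.2 ≠ [] ∧ pvChoose p.2 ≠ [] := by
      intro p hp
      rw [hitems'] at hp
      obtain ⟨q, hq, hqe⟩ := List.mem_map.mp hp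
      by_cases h1 : q.1 = name
      · have : p = (name, g ++ [t]) := by simp [h1] at hqe; exact hqe.symm
        rw [this]
        refine ⟨by simp [hgne], ?_⟩
        rw [hch]
        split
        · exact htne
        · exact hcne
      · have : p = q := by simp [h1] at hqe; exact hqe.symm
        rw [this]; exact hvals q hq
    cases hcond : pvHasSchema t && !pvHasSchema (pvChoose g) with
    | true =>
      simp only [if_true]
      refine ⟨?_, hnd', hmemnew⟩
      rw [PySem.Dict.items_insert_of_contains _ _ hmc, hitems', hitems,
        List.map_map, List.map_map]
      apply List.map_congr_left
      intro p hp
      by_cases h1 : p.1 = name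
      · simp [Function.comp, pvF, h1, hch, hcond]
      · simp [Function.comp, pvF, h1]
    | false =>
      simp only [Bool.false_eq_true, if_false]
      refine ⟨?_, hnd', hmemnew⟩
      rw [hitems', hitems, List.map_map]
      apply List.map_congr_left
      intro p hp
      by_cases h1 : p.1 = name
      · have h2 : p.2 = g := hkey p hp h1
        simp [Function.comp, pvF, h1, h2, hch, hcond]
      · simp [Function.comp, pvF, h1]

-- the whole loop preserves the invariant
theorem pvLoop (ts : List (List (String × String)))
    (hpre : ∀ t ∈ ts, "table_name" ∈ t.map Prod.fst) :
    ∀ (m : PySem.Dict String (List (String × String)))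
      (d : PySem.Dict String (List (List (String × String)))),
    pvRel m d →
    pvRel
      (ts.foldl (fun m table =>
        match pvGet? table "table_name" with
        | none => m
        | some name =>
          let existing := (m.get? name).getD []
          if existing.isEmpty || (pvHasSchema table && !pvHasSchema existing)
          then m.insert name table else m) m)
      (ts.foldl (fun d table =>
        match pvGet? table "table_name" with
        | none => d
        | some name => d.modify name [] (· ++ [table])) d) := by
  induction ts with
  | nil => intro m d h; exact h
  | cons t ts ih =>
    intro m d h
    simp only [List.foldl_cons]
    exact ih (fun x hx => hpre x (List.mem_cons_of_mem _ hx)) _ _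
      (pvStep m d t (hpre t List.mem_cons_self) h)

-- ===== VERDICT (by name: the statement is the Claim_ definition above) =====
theorem filter_duplicate_tables_py_spec : Claim_equal_filter_duplicate_tables_py := by
  intro tables _ hpre
  show filter_duplicate_tables_py tables = filter_duplicate_tables_py_alt tables
  have h := pvLoop tables hpre PySem.Dict.empty PySem.Dict.empty
    ⟨rfl, List.nodup_nil, by intro p hp; simp [PySem.Dict.empty] at hp⟩
  unfold filter_duplicate_tables_py filter_duplicate_tables_py_alt
  obtain ⟨hitems, -, -⟩ := h
  simp only [PySem.Dict.values, hitems, List.map_map]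
  rfl
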